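-- pv_equiv track=rewrite | github.com/pypi-data/pypi-mirror-390 | packages/netdot/netdot-0.5.0.tar.gz/netdot-0.5.0/src/netdot/utils.py | calculate_list_indent
-- ===== SOURCE A (Python) =====
-- def calculate_list_indent(lst):
--     indentation = 1
--     count = len(lst)
--     start = 1
--     while start < count:
--         start *= 10
--         indentation += 1
--     return indentation
-- ===== SOURCE B (Python) =====
-- def calculate_list_indent(lst):
--     count = len(lst)
--     if count < 2:
--         return 1
--     return len(str(count - 1)) + 1
-- ===== Notes on version B (the rewrite author's own statement) =====
-- stated objective: simpler
-- what changed: Replaces the multiply-by-10 while loop with a closed form: the digit count of len(lst)-1 (via len(str(count-1))) plus one, guarding count<2.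
import Mathlib
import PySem

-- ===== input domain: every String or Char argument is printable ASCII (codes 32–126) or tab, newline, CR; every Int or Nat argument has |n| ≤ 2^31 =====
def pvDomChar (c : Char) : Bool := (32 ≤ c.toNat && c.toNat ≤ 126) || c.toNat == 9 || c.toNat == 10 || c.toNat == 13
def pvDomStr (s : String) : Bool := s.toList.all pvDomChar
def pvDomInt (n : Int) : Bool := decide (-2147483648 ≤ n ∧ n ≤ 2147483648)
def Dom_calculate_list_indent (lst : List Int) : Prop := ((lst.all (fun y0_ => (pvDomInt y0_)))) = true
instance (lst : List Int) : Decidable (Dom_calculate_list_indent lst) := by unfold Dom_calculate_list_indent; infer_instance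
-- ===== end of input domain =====

-- B replaces A's multiply-by-10 while loop by a closed form: digit count of len(lst)-1 plus one (simpler).

-- ===== PORT A =====
-- the 'while start < count' loop; the proof argument 0 < start only justifies termination
def calculate_list_indent_loop (count : Nat) (start : Nat) (indentation : Int)
    (hs : 0 < start) : Int :=
  if h : start < count then
    calculate_list_indent_loop count (start * 10) (indentation + 1) (by omega)
  else
    indentation
termination_by count - start
decreasing_by omega

def calculate_list_indent (lst : List Int) : Int :=
  calculate_list_indent_loop lst.length 1 1 (by omega)

-- ===== PORT B =====
def calculate_list_indent_alt (lst : List Int) : Int :=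
  let count : Int := PySem.List.len lst
  if count < 2 then 1
  else PySem.Str.len (PySem.Int.toStr (count - 1)) + 1

-- ===== PRECONDITION & SPEC =====
def Spec_calculate_list_indent (lst : List Int) (out : Int) : Prop := out = calculate_list_indent_alt lst
instance (lst : List Int) (out : Int) : Decidable (Spec_calculate_list_indent lst out) := by unfold Spec_calculate_list_indent; infer_instance

-- ===== CLAIM (what is proved, stated in full; the proofs are below) =====
def Claim_equal_calculate_list_indent : Prop := ∀ (lst : List Int), Dom_calculate_list_indent lst → Spec_calculate_list_indent lst (calculate_list_indent lst)

-- ===== LEMMAS AND PROOFS =====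

-- length of Nat.toDigitsCore with enough fuel is log₁₀ + 1
theorem pv_toDigitsCore_len (f : Nat) : ∀ n : Nat, n < f →
    (Nat.toDigitsCore 10 f n []).length = Nat.log 10 n + 1 := by
  induction f with
  | zero => intro n h; omega
  | succ f ih =>
    intro n h
    rw [Nat.toDigitsCore]
    by_cases h10 : n / 10 = 0
    · have : n < 10 := by omega
      simp [h10, Nat.log_eq_zero_iff.mpr (Or.inl this)]
    · have hn10 : 10 ≤ n := by
        by_contra hc; exact h10 (Nat.div_eq_of_lt (by omega))
      simp only [h10, if_false]
      rw [Nat.toDigitsCore_lens_eq, ih (n / 10) (by omega)]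
      have := Nat.log_div_base 10 n
      have hpos : 1 ≤ Nat.log 10 n := Nat.log_pos (by omega) hn10
      omega

theorem pv_toDigits_len (n : Nat) : (Nat.toDigits 10 n).length = Nat.log 10 n + 1 := by
  exact pv_toDigitsCore_len (n + 1) n (by omega)

-- the loop adds log₁₀((count-1)/start) + 1 to the indentation when it runs at all
theorem pv_loop_eq (d : Nat) : ∀ (count start : Nat) (ind : Int) (hs : 0 < start),
    count - start ≤ d → start < count →
    calculate_list_indent_loop count start ind hs
      = ind + (Nat.log 10 ((count - 1) / start) : Int) + 1 := by
  induction d with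
  | zero => intro count start ind hs hd hlt; omega
  | succ d ih =>
    intro count start ind hs hd hlt
    rw [calculate_list_indent_loop, dif_pos hlt]
    by_cases h2 : start * 10 < count
    · rw [ih count (start * 10) (ind + 1) (by omega) (by omega) h2]
      have hdd : (count - 1) / (start * 10) = ((count - 1) / start) / 10 := by
        rw [Nat.div_div_eq_div_mul]
      have hge : 10 ≤ (count - 1) / start := by
        rw [Nat.le_div_iff_mul_le hs]; omega
      have := Nat.log_div_base 10 ((count - 1) / start)
      have hpos : 1 ≤ Nat.log 10 ((count - 1) / start) := Nat.log_pos (by omega) hge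
      rw [hdd]
      omega
    · rw [calculate_list_indent_loop, dif_neg h2]
      have hlt10 : (count - 1) / start < 10 := by
        rw [Nat.div_lt_iff_lt_mul hs]; omega
      rw [Nat.log_eq_zero_iff.mpr (Or.inl hlt10)]
      simp

-- ===== VERDICT (by name: the statement is the Claim_ definition above) =====
theorem calculate_list_indent_spec : Claim_equal_calculate_list_indent := by
  intro lst _
  unfold Spec_calculate_list_indent calculate_list_indent calculate_list_indent_alt
  set n := lst.length with hn
  by_cases h2 : n < 2
  · rw [calculate_list_indent_loop, dif_neg (by omega)]
    simp [PySem.List.len_eq, ← hn]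
    omega
  · rw [pv_loop_eq n n 1 1 (by omega) (by omega) (by omega)]
    have hcast : (PySem.List.len lst : Int) - 1 = ((n - 1 : Nat) : Int) := by
      simp [PySem.List.len_eq, ← hn]; omega
    rw [if_neg (by simp [PySem.List.len_eq, ← hn]; omega), hcast]
    have hnn : ¬ (((n - 1 : Nat) : Int) < 0) := by
      simp
    have htc : (PySem.Int.toStr ((n - 1 : Nat) : Int)).toList = Nat.toDigits 10 (n - 1) := by
      simp [PySem.Int.toList_toStr, PySem.Int.toChars, hnn]
    rw [PySem.Str.len_eq, htc, pv_toDigits_len, Nat.div_one]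
    push_cast
    ring
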